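-- pv_equiv track=rewrite | github.com/rickhallett/blackcore | blackcore/minimal/query_engine/analytics/network_analyzer.py | _focus_on_entity
-- ===== SOURCE A (Python) =====
-- from typing import Dict, List, Any, Optional, Tuple, Set
-- from collections import defaultdict, deque
--
-- def _focus_on_entity(
--
--     graph: Dict[str, Set[str]],
--     focus_entity: str,
--     max_depth: int
-- ) -> Dict[str, Set[str]]:
--     """Focus graph analysis on a specific entity and its neighborhood.
--
--     Args:
--         graph: Graph as adjacency lists
--         focus_entity: Entity to focus on
--         max_depth: Maximum depth to traverse
--
--     Returns:
--         Filtered graph focused on the entity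
--     """
--     # Find the focus entity in the graph
--     focus_node = None
--     for node in graph:
--         if focus_entity.lower() in node.lower():
--             focus_node = node
--             break
--
--     if not focus_node:
--         return graph  # Return original if focus entity not found
--
--     # BFS to find nodes within max_depth
--     visited = set()
--     queue = deque([(focus_node, 0)])
--     focused_nodes = set()
--
--     while queue:
--         node, depth = queue.popleft()
--
--         if node in visited or depth > max_depth:
--             continue
--
--         visited.add(node)
--         focused_nodes.add(node)
--
--         if depth < max_depth:
--             for neighbor in graph.get(node, set()):
--                 if neighbor not in visited:
--                     queue.append((neighbor, depth + 1))
--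
--     # Build focused graph
--     focused_graph = {}
--     for node in focused_nodes:
--         if node in graph:
--             connections = graph[node] & focused_nodes
--             if connections:
--                 focused_graph[node] = connections
--
--     return focused_graph
-- ===== SOURCE B (Python) =====
-- def _focus_on_entity(graph, focus_entity, max_depth):
--     """Focus graph analysis on a specific entity and its neighborhood.
--
--     Naive fixpoint iteration: the neighborhood ball is computed by repeatedly
--     applying the one-step expansion S -> S | N(S) to the whole current set
--     (as in naive Datalog evaluation), with a size-based fixpoint test --
--     no queue, no frontier, no per-neighbor visited bookkeeping.
--     """
--     needle = focus_entity.lower()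
--     focus_node = next((node for node in graph if needle in node.lower()), None)
--     if not focus_node:
--         return graph  # Return original if focus entity not found
--
--     if max_depth < 0:
--         reach = set()
--     else:
--         reach = {focus_node}
--         for _ in range(max_depth):
--             grown = set(reach)
--             for n in reach:
--                 grown |= graph.get(n, set())
--             if len(grown) == len(reach):
--                 break  # fixpoint reached
--             reach = grown
--
--     return {n: c for n in reach if n in graph and (c := graph[n] & reach)}
-- ===== Notes on version B (the rewrite author's own statement) =====
-- stated objective: alternative
-- what changed: A's BFS with a work queue of (node, depth) pairs and per-neighbor visited checks is replaced by naive fixpoint iteration: up to max_depth rounds of the whole-set expansion S -> S | N(S) with a size-based fixpoint test (as in naive Datalog evaluation), with no queue, no frontier and no per-neighbor bookkeeping; the induced subgraph is built by a dict comprehension.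
import Mathlib
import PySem

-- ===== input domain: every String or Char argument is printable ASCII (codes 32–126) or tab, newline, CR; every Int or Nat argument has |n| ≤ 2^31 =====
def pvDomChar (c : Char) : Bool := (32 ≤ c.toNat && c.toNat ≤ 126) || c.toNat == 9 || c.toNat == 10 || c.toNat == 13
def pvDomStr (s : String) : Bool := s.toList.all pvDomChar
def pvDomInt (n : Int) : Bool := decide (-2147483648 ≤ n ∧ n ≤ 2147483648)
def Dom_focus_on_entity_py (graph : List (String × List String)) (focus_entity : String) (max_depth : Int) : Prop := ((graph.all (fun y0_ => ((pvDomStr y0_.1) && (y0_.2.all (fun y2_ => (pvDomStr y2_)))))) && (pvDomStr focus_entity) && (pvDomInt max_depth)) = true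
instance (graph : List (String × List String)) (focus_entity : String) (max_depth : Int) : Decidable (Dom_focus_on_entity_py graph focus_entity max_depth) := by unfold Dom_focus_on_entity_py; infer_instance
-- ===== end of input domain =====

-- B replaces A's deque BFS by naive fixpoint iteration of S ↦ S ∪ N(S) over the whole
-- current set with a size-based fixpoint test (objective: alternative, no speed claim).

-- ===== PORT A =====
-- helpers shared by both ports (identical Python lines in both sources):
-- `focus_entity.lower() in node.lower()` scan over the dict's keys
def pvFindFocus (graph : List (String × List String)) (focus_entity : String) : Option String :=
  (PySem.Dict.mk graph).keys.find? (fun node => PySem.Str.isIn (PySem.Str.lower focus_entity) (PySem.Str.lower node))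

-- `graph.get(node, set())`
def pvGet (graph : List (String × List String)) (n : String) : List String :=
  (PySem.Dict.get? (PySem.Dict.mk graph) n).getD []

-- A's final `focused_graph` construction:
-- for node in focused_nodes: if node in graph: connections = graph[node] & focused_nodes; if connections: focused_graph[node] = connections
def pvBuild (graph : List (String × List String)) (focused : PySem.Set String) : List (String × List String) :=
  focused.foldl (fun acc node =>
    match PySem.Dict.get? (PySem.Dict.mk graph) node with
    | none => acc
    | some conns =>
      let inter := PySem.Set.inter conns focused
      if inter = [] then acc else acc ++ [(node, inter)]) []

-- termination bookkeeping for A's while-loop (the port cites these in decreasing_by)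
def pvUniverse (graph : List (String × List String)) : List String :=
  graph.map Prod.fst ++ (graph.map Prod.snd).flatten

def pvAdjBound (graph : List (String × List String)) : Nat :=
  ((graph.map Prod.snd).map List.length).sum

def pvUnvisited (graph : List (String × List String)) (V : PySem.Set String) : Nat :=
  ((pvUniverse graph).filter (fun s => !(PySem.Set.contains V s))).length

theorem pv_notc (V : PySem.Set String) (x : String) : (!(PySem.Set.contains V x)) = true ↔ x ∉ V := by
  simp

theorem pv_mem_add_left (V : PySem.Set String) (n x : String) (h : x ∈ V) : x ∈ V.add n :=
  (PySem.Set.mem_add V n x).mpr (Or.inl h)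

theorem pv_countP_mono (l : List String) (V : PySem.Set String) (n : String) :
    l.countP (fun s => !(PySem.Set.contains (V.add n) s)) ≤ l.countP (fun s => !(PySem.Set.contains V s)) := by
  refine List.countP_mono_left fun x _ hb => ?_
  rw [pv_notc] at *
  exact fun hm => hb (pv_mem_add_left V n x hm)

theorem pvUnvisited_mono (graph : List (String × List String)) (V : PySem.Set String) (n : String) :
    pvUnvisited graph (V.add n) ≤ pvUnvisited graph V := by
  unfold pvUnvisited
  simp only [← List.countP_eq_length_filter]
  exact pv_countP_mono _ V n

theorem pvUnvisited_lt (graph : List (String × List String)) (V : PySem.Set String) (n : String)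
    (hU : n ∈ pvUniverse graph) (hV : n ∉ V) :
    pvUnvisited graph (V.add n) < pvUnvisited graph V := by
  unfold pvUnvisited
  obtain ⟨l1, l2, heq⟩ : ∃ l1 l2, pvUniverse graph = l1 ++ n :: l2 := List.append_of_mem hU
  rw [heq]
  simp only [← List.countP_eq_length_filter, List.countP_append, List.countP_cons]
  have h1 := pv_countP_mono l1 V n
  have h2 := pv_countP_mono l2 V n
  have hq : (fun s => !(PySem.Set.contains V s)) n = true := (pv_notc V n).mpr hV
  have hp : (fun s => !(PySem.Set.contains (V.add n) s)) n = false := by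
    rw [Bool.eq_false_iff]
    intro h
    exact (pv_notc _ n).mp h ((PySem.Set.mem_add V n n).mpr (Or.inr rfl))
  simp only [hq, hp] at *
  simp only [Bool.false_eq_true, if_false, if_true]
  omega

theorem pvUnvisited_add_not_mem (graph : List (String × List String)) (V : PySem.Set String) (n : String)
    (hU : n ∉ pvUniverse graph) :
    pvUnvisited graph (V.add n) = pvUnvisited graph V := by
  unfold pvUnvisited
  refine congrArg List.length (List.filter_congr fun x hx => ?_)
  have hxn : x ≠ n := fun h => hU (h ▸ hx)
  by_cases hm : x ∈ V
  · have : x ∈ V.add n := pv_mem_add_left V n x hm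
    simp [hm, this]
  · have : x ∉ V.add n := fun h => by
      rcases (PySem.Set.mem_add V n x).mp h with h' | h'
      · exact hm h'
      · exact hxn h'
    simp [hm, this]

theorem pvGet_unfold (k : String) (v : List String) (g : List (String × List String)) (n : String) :
    pvGet ((k, v) :: g) n = if k == n then v else pvGet g n := by
  simp only [pvGet, PySem.Dict.get?]
  by_cases h : k == n
  · simp [h]
  · simp [List.find?, h]

theorem pvGet_cases (graph : List (String × List String)) (n : String) :
    pvGet graph n = [] ∨ ∃ p ∈ graph, p.1 = n ∧ pvGet graph n = p.2 := by
  induction graph with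
  | nil => left; rfl
  | cons p g ih =>
    obtain ⟨k, v⟩ := p
    rw [pvGet_unfold]
    by_cases h : k == n
    · right
      exact ⟨(k, v), List.mem_cons_self, by simpa using h, by simp [h]⟩
    · simp only [h, Bool.false_eq_true, if_false]
      rcases ih with h' | ⟨q, hq, hq1, hq2⟩
      · left; exact h'
      · right; exact ⟨q, List.mem_cons_of_mem _ hq, hq1, hq2⟩

theorem pvGet_nil_of_not_mem (graph : List (String × List String)) (n : String)
    (hU : n ∉ pvUniverse graph) : pvGet graph n = [] := by
  rcases pvGet_cases graph n with h | ⟨p, hp, hp1, _⟩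
  · exact h
  · exfalso
    exact hU (List.mem_append_left _ (hp1 ▸ List.mem_map_of_mem hp))

theorem pvGet_len_le (graph : List (String × List String)) (n : String) :
    (pvGet graph n).length ≤ pvAdjBound graph := by
  rcases pvGet_cases graph n with h | ⟨p, hp, _, hp2⟩
  · simp [h]
  · rw [hp2]
    unfold pvAdjBound
    refine List.single_le_sum (fun x _ => Nat.zero_le x) _ ?_
    exact List.mem_map_of_mem (List.mem_map_of_mem hp)

-- A's while-loop over the deque of (node, depth) pairs
def pvLoopA (graph : List (String × List String)) (maxd : Int) (V F : PySem.Set String)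
    (queue : List (String × Int)) : PySem.Set String :=
  match queue with
  | [] => F
  | (n, d) :: rest =>
    if n ∈ V ∨ d > maxd then pvLoopA graph maxd V F rest
    else if d < maxd then
      pvLoopA graph maxd (V.add n) (F.add n)
        (rest ++ ((pvGet graph n).filter (fun nb => !(PySem.Set.contains (V.add n) nb))).map (fun nb => (nb, d + 1)))
    else
      pvLoopA graph maxd (V.add n) (F.add n) rest
termination_by pvUnvisited graph V * (1 + pvAdjBound graph) + queue.length
decreasing_by
  · simp only [List.length_cons]
    omega
  · simp only [List.length_append, List.length_cons, List.length_map]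
    by_cases hU : n ∈ pvUniverse graph
    · have h1 := pvUnvisited_lt graph V n hU (by tauto)
      have h2 : (List.filter (fun nb => !(PySem.Set.contains (V.add n) nb)) (pvGet graph n)).length ≤ pvAdjBound graph :=
        le_trans (List.length_filter_le _ _) (pvGet_len_le graph n)
      have h3 : pvUnvisited graph (V.add n) * (1 + pvAdjBound graph) + (1 + pvAdjBound graph) ≤ pvUnvisited graph V * (1 + pvAdjBound graph) := by
        have := Nat.succ_le_of_lt h1
        calc pvUnvisited graph (V.add n) * (1 + pvAdjBound graph) + (1 + pvAdjBound graph)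
            = (pvUnvisited graph (V.add n) + 1) * (1 + pvAdjBound graph) := by ring
          _ ≤ pvUnvisited graph V * (1 + pvAdjBound graph) := Nat.mul_le_mul_right _ this
      omega
    · rw [pvGet_nil_of_not_mem graph n hU]
      rw [pvUnvisited_add_not_mem graph V n hU]
      simp
  · have := pvUnvisited_mono graph V n
    have h3 : pvUnvisited graph (V.add n) * (1 + pvAdjBound graph) ≤ pvUnvisited graph V * (1 + pvAdjBound graph) :=
      Nat.mul_le_mul_right _ this
    simp only [List.length_cons]
    omega

def focus_on_entity_py (graph : List (String × List String)) (focus_entity : String) (max_depth : Int) : List (String × List String) :=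
  match pvFindFocus graph focus_entity with
  | none => graph
  | some f =>
    if f = "" then graph
    else pvBuild graph (pvLoopA graph max_depth [] [] [(f, 0)])

-- ===== PORT B =====
-- one expansion round: grown = set(reach); for n in reach: grown |= graph.get(n, set())
def pvGrow (graph : List (String × List String)) (reach : PySem.Set String) : PySem.Set String :=
  reach.foldl (fun grown n => PySem.Set.union grown (pvGet graph n)) reach

-- for _ in range(max_depth): grown = <one round>; if len(grown) == len(reach): break; reach = grown
def pvSweep (graph : List (String × List String)) : Nat → PySem.Set String → PySem.Set String
  | 0, reach => reach
  | k + 1, reach =>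
    let grown := pvGrow graph reach
    if grown.length = reach.length then reach else pvSweep graph k grown

-- {n: c for n in reach if n in graph and (c := graph[n] & reach)}
def pvBuildB (graph : List (String × List String)) (reach : PySem.Set String) : List (String × List String) :=
  reach.filterMap (fun n =>
    match PySem.Dict.get? (PySem.Dict.mk graph) n with
    | none => none
    | some nbrs =>
      let c := PySem.Set.inter nbrs reach
      if c = [] then none else some (n, c))

def focus_on_entity_py_alt (graph : List (String × List String)) (focus_entity : String) (max_depth : Int) : List (String × List String) :=
  match pvFindFocus graph focus_entity with
  | none => graph
  | some f =>
    if f = "" then graph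
    else
      let reach : PySem.Set String :=
        if max_depth < 0 then PySem.Set.empty
        else pvSweep graph max_depth.toNat (PySem.Set.add PySem.Set.empty f)
      pvBuildB graph reach

-- ===== PRECONDITION & SPEC =====
def Spec_focus_on_entity_py (graph : List (String × List String)) (focus_entity : String) (max_depth : Int) (out : List (String × List String)) : Prop := out = focus_on_entity_py_alt graph focus_entity max_depth
instance (graph : List (String × List String)) (focus_entity : String) (max_depth : Int) (out : List (String × List String)) : Decidable (Spec_focus_on_entity_py graph focus_entity max_depth out) := by unfold Spec_focus_on_entity_py; infer_instance

-- ===== CLAIM (what is proved, stated in full; the proofs are below) =====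
def Claim_equal_focus_on_entity_py : Prop := ∀ (graph : List (String × List String)) (focus_entity : String) (max_depth : Int), Dom_focus_on_entity_py graph focus_entity max_depth → Spec_focus_on_entity_py graph focus_entity max_depth (focus_on_entity_py graph focus_entity max_depth)

-- ===== LEMMAS AND PROOFS =====

-- a fold that appends an optional entry per element is a filterMap
theorem pv_foldl_opt (g : String → Option (String × List String)) (l : List String) :
    ∀ (acc : List (String × List String)),
    l.foldl (fun acc n => match g n with | none => acc | some p => acc ++ [p]) acc
      = acc ++ l.filterMap g := by
  induction l with
  | nil => intro acc; simp
  | cons x xs ih =>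
    intro acc
    rw [List.foldl_cons, List.filterMap_cons]
    cases hx : g x with
    | none => simpa using ih acc
    | some p => rw [ih (acc ++ [p])]; simp

-- the two final-build styles agree
theorem pvBuild_eq_pvBuildB (graph : List (String × List String)) (s : PySem.Set String) :
    pvBuild graph s = pvBuildB graph s := by
  unfold pvBuild pvBuildB
  have hfun : (fun (acc : List (String × List String)) node =>
      match PySem.Dict.get? (PySem.Dict.mk graph) node with
      | none => acc
      | some conns =>
        let inter := PySem.Set.inter conns s
        if inter = [] then acc else acc ++ [(node, inter)])
    = (fun acc n => match (fun n => match PySem.Dict.get? (PySem.Dict.mk graph) n with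
          | none => none
          | some nbrs =>
            let c := PySem.Set.inter nbrs s
            if c = [] then none else some (n, c)) n with
        | none => acc
        | some p => acc ++ [p]) := by
    funext acc n
    cases hx : PySem.Dict.get? (PySem.Dict.mk graph) n with
    | none => simp [hx]
    | some conns =>
      by_cases hc : PySem.Set.inter conns s = [] <;> simp [hx, hc]
  rw [hfun]
  exact (pv_foldl_opt (fun n => match PySem.Dict.get? (PySem.Dict.mk graph) n with
    | none => none
    | some nbrs =>
      let c := PySem.Set.inter nbrs s
      if c = [] then none else some (n, c)) s []).trans (by simp)

-- B-side fresh-add loop (the level-synchronous intermediate used only by the proof)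
def pvAddFresh (V : PySem.Set String) (out l : List String) : PySem.Set String × List String :=
  match l with
  | [] => (V, out)
  | x :: xs => if x ∈ V then pvAddFresh V out xs else pvAddFresh (V.add x) (out ++ [x]) xs

def pvLevel (graph : List (String × List String)) (V : PySem.Set String) (out fr : List String) :
    PySem.Set String × List String :=
  match fr with
  | [] => (V, out)
  | n :: ns =>
    let p := pvAddFresh V out (pvGet graph n)
    pvLevel graph p.1 p.2 ns

def pvFront (graph : List (String × List String)) : Nat → PySem.Set String → List String → PySem.Set String
  | 0, V, _ => V
  | k + 1, V, fr =>
    let p := pvLevel graph V [] fr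
    if p.2 = [] then p.1 else pvFront graph k p.1 p.2

theorem pvAddFresh_fst_mem (l : List String) : ∀ (V : PySem.Set String) (out : List String) (x : String),
    x ∈ V → x ∈ (pvAddFresh V out l).1 := by
  induction l with
  | nil => intro V out x h; exact h
  | cons y ys ih =>
    intro V out x h
    rw [pvAddFresh]
    by_cases hy : y ∈ V
    · simp only [hy, if_pos]; exact ih V out x h
    · simp only [hy, if_false]
      exact ih _ _ x ((PySem.Set.mem_add V y x).mpr (Or.inl h))

theorem pvAddFresh_fst_mem_arg (l : List String) : ∀ (V : PySem.Set String) (out : List String) (x : String),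
    x ∈ l → x ∈ (pvAddFresh V out l).1 := by
  induction l with
  | nil => intro V out x h; cases h
  | cons y ys ih =>
    intro V out x h
    rw [pvAddFresh]
    by_cases hy : y ∈ V
    · simp only [hy, if_pos]
      rcases List.mem_cons.mp h with rfl | h
      · exact pvAddFresh_fst_mem ys V out x hy
      · exact ih V out x h
    · simp only [hy, if_false]
      rcases List.mem_cons.mp h with rfl | h
      · exact pvAddFresh_fst_mem ys _ _ x ((PySem.Set.mem_add V x x).mpr (Or.inr rfl))
      · exact ih _ _ x h

theorem pvAddFresh_acc (l : List String) : ∀ (V : PySem.Set String) (out : List String),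
    pvAddFresh V out l = ((pvAddFresh V [] l).1, out ++ (pvAddFresh V [] l).2) := by
  induction l with
  | nil => intro V out; simp [pvAddFresh]
  | cons y ys ih =>
    intro V out
    rw [pvAddFresh, pvAddFresh]
    by_cases hy : y ∈ V
    · simp only [hy, if_pos]; exact ih V out
    · simp only [hy, if_false]
      rw [ih (V.add y) (out ++ [y]), ih (V.add y) ([] ++ [y])]
      simp

theorem pvAddFresh_fst_foldl (l : List String) : ∀ (V : PySem.Set String) (out : List String),
    (pvAddFresh V out l).1 = l.foldl PySem.Set.add V := by
  induction l with
  | nil => intro V out; rfl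
  | cons y ys ih =>
    intro V out
    rw [pvAddFresh, List.foldl_cons]
    by_cases hy : y ∈ V
    · simp only [hy, if_pos]
      rw [PySem.Set.add_of_mem hy]
      exact ih V out
    · simp only [hy, if_false]
      exact ih _ _

theorem pvAddFresh_fst_append (l : List String) : ∀ (V : PySem.Set String),
    (pvAddFresh V [] l).1 = V ++ (pvAddFresh V [] l).2 := by
  induction l with
  | nil => intro V; simp [pvAddFresh]
  | cons y ys ih =>
    intro V
    rw [pvAddFresh]
    by_cases hy : y ∈ V
    · simp only [hy, if_pos]; exact ih V
    · simp only [hy, if_false]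
      rw [pvAddFresh_acc ys (V.add y) ([] ++ [y])]
      simp only [List.nil_append]
      rw [ih (V.add y), PySem.Set.add_of_not_mem hy]
      simp

theorem pvLevel_acc (graph : List (String × List String)) (fr : List String) :
    ∀ (V : PySem.Set String) (out : List String),
    pvLevel graph V out fr = ((pvLevel graph V [] fr).1, out ++ (pvLevel graph V [] fr).2) := by
  induction fr with
  | nil => intro V out; simp [pvLevel]
  | cons n ns ih =>
    intro V out
    rw [pvLevel, pvLevel]
    rw [pvAddFresh_acc (pvGet graph n) V out, pvAddFresh_acc (pvGet graph n) V []]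
    simp only [List.nil_append]
    rw [ih ((pvAddFresh V [] (pvGet graph n)).1) (out ++ (pvAddFresh V [] (pvGet graph n)).2),
        ih ((pvAddFresh V [] (pvGet graph n)).1) ((pvAddFresh V [] (pvGet graph n)).2)]
    simp

theorem pvLevel_fst_append (graph : List (String × List String)) (fr : List String) :
    ∀ (V : PySem.Set String),
    (pvLevel graph V [] fr).1 = V ++ (pvLevel graph V [] fr).2 := by
  induction fr with
  | nil => intro V; simp [pvLevel]
  | cons n ns ih =>
    intro V
    rw [pvLevel]
    rw [pvLevel_acc graph ns ((pvAddFresh V [] (pvGet graph n)).1) ((pvAddFresh V [] (pvGet graph n)).2)]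
    simp only
    rw [ih ((pvAddFresh V [] (pvGet graph n)).1)]
    rw [pvAddFresh_fst_append (pvGet graph n) V]
    simp

theorem pvLevel_fst_mem (graph : List (String × List String)) (fr : List String) :
    ∀ (V : PySem.Set String) (x : String), x ∈ V → x ∈ (pvLevel graph V [] fr).1 := by
  induction fr with
  | nil => intro V x h; exact h
  | cons n ns ih =>
    intro V x h
    rw [pvLevel]
    rw [pvLevel_acc graph ns ((pvAddFresh V [] (pvGet graph n)).1) ((pvAddFresh V [] (pvGet graph n)).2)]
    exact ih _ x (pvAddFresh_fst_mem (pvGet graph n) V [] x h)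

theorem pvLevel_fst_mem_nbr (graph : List (String × List String)) (fr : List String) :
    ∀ (V : PySem.Set String) (n x : String), n ∈ fr → x ∈ pvGet graph n → x ∈ (pvLevel graph V [] fr).1 := by
  induction fr with
  | nil => intro V n x h; cases h
  | cons m ms ih =>
    intro V n x hn hx
    rw [pvLevel]
    rw [pvLevel_acc graph ms ((pvAddFresh V [] (pvGet graph m)).1) ((pvAddFresh V [] (pvGet graph m)).2)]
    rcases List.mem_cons.mp hn with rfl | hn
    · exact pvLevel_fst_mem graph ms _ x (pvAddFresh_fst_mem_arg (pvGet graph n) V [] x hx)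
    · exact ih _ n x hn hx

-- pvLevel's visited set is the plain foldl-add over the frontier's adjacency lists
theorem pvLevel_fst_foldl (graph : List (String × List String)) (fr : List String) :
    ∀ (V : PySem.Set String),
    (pvLevel graph V [] fr).1 = fr.foldl (fun acc n => (pvGet graph n).foldl PySem.Set.add acc) V := by
  induction fr with
  | nil => intro V; rfl
  | cons n ns ih =>
    intro V
    rw [pvLevel, List.foldl_cons]
    rw [pvLevel_acc graph ns ((pvAddFresh V [] (pvGet graph n)).1) ((pvAddFresh V [] (pvGet graph n)).2)]
    simp only
    rw [ih ((pvAddFresh V [] (pvGet graph n)).1), pvAddFresh_fst_foldl]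

theorem pv_foldl_add_of_subset (l : List String) : ∀ (s : PySem.Set String),
    (∀ x ∈ l, x ∈ s) → l.foldl PySem.Set.add s = s := by
  induction l with
  | nil => intro s _; rfl
  | cons y ys ih =>
    intro s h
    rw [List.foldl_cons, PySem.Set.add_of_mem (h y List.mem_cons_self)]
    exact ih s (fun x hx => h x (List.mem_cons_of_mem _ hx))

-- the whole-set expansion round equals the level step, when the old part is already saturated
theorem pvGrow_eq_level (graph : List (String × List String)) (P fr : List String)
    (hP : ∀ n ∈ P, ∀ x ∈ pvGet graph n, x ∈ P ++ fr) :
    pvGrow graph (P ++ fr) = (pvLevel graph (P ++ fr) [] fr).1 := by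
  unfold pvGrow
  rw [List.foldl_append]
  have hPfold : P.foldl (fun grown n => PySem.Set.union grown (pvGet graph n)) (P ++ fr) = P ++ fr := by
    have : ∀ (P' : List String), (∀ n ∈ P', ∀ x ∈ pvGet graph n, x ∈ P ++ fr) →
        P'.foldl (fun grown n => PySem.Set.union grown (pvGet graph n)) (P ++ fr) = P ++ fr := by
      intro P'
      induction P' with
      | nil => intro _; rfl
      | cons m ms ih =>
        intro h
        rw [List.foldl_cons]
        have : PySem.Set.union (P ++ fr) (pvGet graph m) = P ++ fr :=
          pv_foldl_add_of_subset (pvGet graph m) (P ++ fr) (h m List.mem_cons_self)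
        rw [this]
        exact ih (fun n hn => h n (List.mem_cons_of_mem _ hn))
    exact this P hP
  rw [hPfold, pvLevel_fst_foldl]
  rfl

-- the sweep equals the frontier iteration under the saturation invariant
theorem pvSweep_eq_front (graph : List (String × List String)) (k : Nat) :
    ∀ (P fr : List String),
    (∀ n ∈ P, ∀ x ∈ pvGet graph n, x ∈ P ++ fr) →
    pvSweep graph k (P ++ fr) = pvFront graph k (P ++ fr) fr := by
  induction k with
  | zero => intro P fr _; rfl
  | succ k ih =>
    intro P fr hP
    rw [pvSweep, pvFront]
    rw [pvGrow_eq_level graph P fr hP]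
    rw [pvLevel_fst_append graph fr (P ++ fr)]
    by_cases hnil : (pvLevel graph (P ++ fr) [] fr).2 = []
    · rw [hnil]
      simp
    · have hne : (P ++ fr ++ (pvLevel graph (P ++ fr) [] fr).2).length ≠ (P ++ fr).length := by
        simp only [List.length_append]
        have : (pvLevel graph (P ++ fr) [] fr).2.length ≠ 0 := by
          simpa [List.length_eq_zero_iff] using hnil
        omega
      rw [if_neg hne, if_neg hnil]
      have := ih (P ++ fr) ((pvLevel graph (P ++ fr) [] fr).2) ?_
      · exact this
      · intro n hn x hx
        rw [← pvLevel_fst_append graph fr (P ++ fr)]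
        rcases List.mem_append.mp hn with hn | hn
        · exact pvLevel_fst_mem graph fr (P ++ fr) x (hP n hn x hx)
        · exact pvLevel_fst_mem_nbr graph fr (P ++ fr) n x hn hx

-- === the A-side machinery: A's deque BFS drains level by level ===
def pvProc (graph : List (String × List String)) (V : PySem.Set String) (ps : List String) :
    PySem.Set String × List String :=
  match ps with
  | [] => (V, [])
  | p :: ps' =>
    if p ∈ V then pvProc graph V ps'
    else
      let r := pvProc graph (V.add p) ps'
      (r.1, (pvGet graph p).filter (fun nb => !(PySem.Set.contains (V.add p) nb)) ++ r.2)

theorem pvProc_fst (graph : List (String × List String)) (ps : List String) :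
    ∀ (V : PySem.Set String), (pvProc graph V ps).1 = ps.foldl PySem.Set.add V := by
  induction ps with
  | nil => intro V; rfl
  | cons p ps' ih =>
    intro V
    rw [pvProc, List.foldl_cons]
    by_cases hp : p ∈ V
    · simp only [hp, if_pos]
      rw [PySem.Set.add_of_mem hp]
      exact ih V
    · simp only [hp, if_false]
      exact ih _

theorem pvAddFresh_filter (l : List String) : ∀ (V : PySem.Set String) (out : List String) (p : String → Bool),
    (∀ x ∈ l, p x = true → x ∈ V) →
    pvAddFresh V out (l.filter (fun x => !(p x))) = pvAddFresh V out l := by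
  induction l with
  | nil => intro V out p _; rfl
  | cons y ys ih =>
    intro V out p hp
    rw [List.filter_cons]
    by_cases hy : p y = true
    · have hyV : y ∈ V := hp y List.mem_cons_self hy
      simp only [hy, Bool.not_true, if_false, Bool.false_eq_true]
      rw [pvAddFresh]
      simp only [hyV, if_pos]
      exact ih V out p (fun x hx => hp x (List.mem_cons_of_mem _ hx))
    · simp only [hy, Bool.not_false, if_true]
      rw [pvAddFresh, pvAddFresh]
      by_cases hyV : y ∈ V
      · simp only [hyV, if_pos]
        exact ih V out p (fun x hx => hp x (List.mem_cons_of_mem _ hx))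
      · simp only [hyV, if_false]
        refine ih _ _ p (fun x hx hxp => ?_)
        exact (PySem.Set.mem_add V y x).mpr (Or.inl (hp x (List.mem_cons_of_mem _ hx) hxp))

theorem pv_step (graph : List (String × List String)) (maxd e : Int) (he : e < maxd) (ps : List String) :
    ∀ (ms : List String) (V : PySem.Set String),
    pvLoopA graph maxd V V (ps.map (fun n => (n, e)) ++ ms.map (fun n => (n, e + 1)))
      = pvLoopA graph maxd (pvProc graph V ps).1 (pvProc graph V ps).1
          ((ms ++ (pvProc graph V ps).2).map (fun n => (n, e + 1))) := by
  induction ps with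
  | nil => intro ms V; simp [pvProc]
  | cons p ps' ih =>
    intro ms V
    rw [List.map_cons, List.cons_append, pvLoopA, pvProc]
    by_cases hp : p ∈ V
    · rw [if_pos (Or.inl hp), if_pos hp]
      exact ih ms V
    · rw [if_neg hp]
      have hcond : ¬ (p ∈ V ∨ e > maxd) := by
        rintro (h | h)
        · exact hp h
        · omega
      rw [if_neg hcond, if_pos he]
      rw [List.append_assoc, ← List.map_append]
      rw [show ms ++ ((pvGet graph p).filter (fun nb => !(PySem.Set.contains (V.add p) nb)) ++ (pvProc graph (V.add p) ps').2) = (ms ++ (pvGet graph p).filter (fun nb => !(PySem.Set.contains (V.add p) nb))) ++ (pvProc graph (V.add p) ps').2 from (List.append_assoc _ _ _).symm]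
      exact ih (ms ++ (pvGet graph p).filter (fun nb => !(PySem.Set.contains (V.add p) nb))) (V.add p)

theorem pv_last (graph : List (String × List String)) (maxd : Int) (ps : List String) :
    ∀ (V : PySem.Set String),
    pvLoopA graph maxd V V (ps.map (fun n => (n, maxd))) = ps.foldl PySem.Set.add V := by
  induction ps with
  | nil =>
    intro V
    rw [List.map_nil, pvLoopA, List.foldl_nil]
  | cons p ps' ih =>
    intro V
    rw [List.map_cons, pvLoopA, List.foldl_cons]
    by_cases hp : p ∈ V
    · rw [if_pos (Or.inl hp), PySem.Set.add_of_mem hp]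
      exact ih V
    · have hcond : ¬ (p ∈ V ∨ maxd > maxd) := by
        rintro (h | h)
        · exact hp h
        · omega
      rw [if_neg hcond, if_neg (lt_irrefl maxd)]
      exact ih _

theorem pvFront_nil (graph : List (String × List String)) (k : Nat) (V : PySem.Set String) :
    pvFront graph k V [] = V := by
  cases k with
  | zero => rfl
  | succ k => rw [pvFront]; simp [pvLevel]

theorem pvAddFresh_append (a : List String) : ∀ (b : List String) (V : PySem.Set String) (out : List String),
    pvAddFresh V out (a ++ b) = pvAddFresh (pvAddFresh V out a).1 (pvAddFresh V out a).2 b := by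
  induction a with
  | nil => intro b V out; rfl
  | cons y ys ih =>
    intro b V out
    rw [List.cons_append, pvAddFresh, pvAddFresh]
    by_cases hy : y ∈ V
    · simp only [hy, if_pos]; exact ih b V out
    · simp only [hy, if_false]; exact ih b _ _

theorem pv_core (graph : List (String × List String)) (ns : List String) :
    ∀ (V S : PySem.Set String), (∀ x, x ∈ (pvAddFresh V [] ns).1 → x ∈ S) →
    pvLevel graph S [] (pvAddFresh V [] ns).2 = pvAddFresh S [] (pvProc graph V ns).2 := by
  induction ns with
  | nil => intro V S _; rfl
  | cons n ns' ih =>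
    intro V S hS
    by_cases hn : n ∈ V
    · rw [pvAddFresh, if_pos hn] at hS ⊢
      rw [pvProc, if_pos hn]
      exact ih V S hS
    · rw [pvAddFresh, if_neg hn] at hS ⊢
      rw [pvProc, if_neg hn]
      rw [pvAddFresh_acc ns' (V.add n) ([] ++ [n])] at hS ⊢
      simp only [List.nil_append, List.singleton_append] at hS ⊢
      rw [pvLevel]
      have hfil : pvAddFresh S [] ((pvGet graph n).filter (fun nb => !(PySem.Set.contains (V.add n) nb)))
          = pvAddFresh S [] (pvGet graph n) := by
        refine pvAddFresh_filter (pvGet graph n) S [] _ (fun x hx hxp => ?_)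
        have hxm : x ∈ V.add n := (PySem.Set.contains_iff _ _).mp hxp
        exact hS x (pvAddFresh_fst_mem ns' (V.add n) [] x hxm)
      have happ : pvAddFresh S [] ((pvGet graph n).filter (fun nb => !(PySem.Set.contains (V.add n) nb)) ++ (pvProc graph (V.add n) ns').2)
          = pvAddFresh (pvAddFresh S [] (pvGet graph n)).1 (pvAddFresh S [] (pvGet graph n)).2 ((pvProc graph (V.add n) ns').2) := by
        have := pvAddFresh_append ((pvGet graph n).filter (fun nb => !(PySem.Set.contains (V.add n) nb)))
          ((pvProc graph (V.add n) ns').2) S []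
        rw [this, hfil]
      rw [happ]
      rw [pvAddFresh_acc ((pvProc graph (V.add n) ns').2)
            ((pvAddFresh S [] (pvGet graph n)).1) ((pvAddFresh S [] (pvGet graph n)).2)]
      rw [pvLevel_acc graph ((pvAddFresh (V.add n) [] ns').2)
            ((pvAddFresh S [] (pvGet graph n)).1) ((pvAddFresh S [] (pvGet graph n)).2)]
      rw [ih (V.add n) ((pvAddFresh S [] (pvGet graph n)).1)
            (fun x hx => pvAddFresh_fst_mem (pvGet graph n) S [] x (hS x hx))]

theorem pv_main (graph : List (String × List String)) (maxd : Int) (k : Nat) :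
    ∀ (ns : List String) (V : PySem.Set String),
      pvLoopA graph maxd V V (ns.map (fun n => (n, maxd - (k : Int))))
        = pvFront graph k (pvAddFresh V [] ns).1 (pvAddFresh V [] ns).2 := by
  induction k generalizing maxd with
  | zero =>
    intro ns V
    simp only [Nat.cast_zero, sub_zero]
    rw [pv_last graph maxd ns V, pvAddFresh_fst_foldl ns V []]
    rfl
  | succ k ih =>
    intro ns V
    have he : maxd - ((k + 1 : Nat) : Int) < maxd := by push_cast; omega
    have hmap : ns.map (fun n => (n, maxd - ((k + 1 : Nat) : Int))) = ns.map (fun n => (n, maxd - ((k + 1 : Nat) : Int))) ++ ([] : List String).map (fun n => (n, maxd - ((k + 1 : Nat) : Int) + 1)) := by simp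
    rw [hmap, pv_step graph maxd _ he ns [] V]
    simp only [List.nil_append]
    have harith : maxd - ((k + 1 : Nat) : Int) + 1 = maxd - (k : Int) := by push_cast; omega
    rw [harith]
    rw [ih maxd ((pvProc graph V ns).2) ((pvProc graph V ns).1)]
    have hW : (pvAddFresh V [] ns).1 = (pvProc graph V ns).1 := by
      rw [pvAddFresh_fst_foldl, pvProc_fst]
    rw [pvFront, hW]
    have hcore := pv_core graph ns V ((pvAddFresh V [] ns).1) (fun x hx => hx)
    rw [hW] at hcore
    rw [hcore]
    by_cases hnil : (pvAddFresh (pvProc graph V ns).1 [] (pvProc graph V ns).2).2 = []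
    · simp only [hnil, if_pos]
      rw [pvFront_nil]
    · simp only [hnil, if_false]

-- ===== VERDICT (by name: the statement is the Claim_ definition above) =====
theorem focus_on_entity_py_spec : Claim_equal_focus_on_entity_py := by
  intro graph focus_entity max_depth _
  unfold Spec_focus_on_entity_py focus_on_entity_py focus_on_entity_py_alt
  cases h : pvFindFocus graph focus_entity with
  | none => rfl
  | some f =>
    by_cases hf : f = ""
    · simp [hf]
    · simp only [hf, if_false]
      rw [← pvBuild_eq_pvBuildB]
      by_cases hd : max_depth < 0
      · rw [if_pos hd, pvLoopA]
        simp only [show ((f : String) ∈ ([] : PySem.Set String) ∨ (0:Int) > max_depth) from Or.inr (by omega), if_pos]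
        rw [pvLoopA]
        simp [PySem.Set.empty]
      · rw [if_neg hd]
        have h0 : max_depth - (max_depth.toNat : Int) = 0 := by omega
        have := pv_main graph max_depth max_depth.toNat [f] []
        simp only [List.map, h0] at this
        rw [this]
        have haf : pvAddFresh ([] : PySem.Set String) [] [f] = ([f], [f]) := by
          simp [pvAddFresh]
        rw [haf]
        have hsw := pvSweep_eq_front graph max_depth.toNat [] [f] (by intro n hn; cases hn)
        simp only [List.nil_append] at hsw
        rw [← hsw]
        have : PySem.Set.add PySem.Set.empty f = [f] := by
          simp [PySem.Set.empty]
        rw [this]
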